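-- pv_equiv track=rewrite | github.com/G-Sudarshan-Reddy/fabric_mcp_agent | fabricops_mcp/tools/stage2_pipeline.py | _pick_aggregation_column
-- ===== SOURCE A (Python) =====
-- from typing import Any
--
-- def _pick_aggregation_column(columns: list[dict[str, Any]]) -> str:
-- 	for preferred in ("double", "float"):
-- 		for col in columns:
-- 			if str(col.get("inferred_type", "")).lower() == preferred:
-- 				return str(col.get("name"))
--
-- 	for fallback in ("decimal", "number", "int", "integer", "long"):
-- 		for col in columns:
-- 			if str(col.get("inferred_type", "")).lower() == fallback:
-- 				return str(col.get("name"))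
--
-- 	return str(columns[0].get("name")) if columns else "value"
-- ===== SOURCE B (Python) =====
-- def _pick_aggregation_column(columns: list) -> str:
--     rank = {"double": 0, "float": 1, "decimal": 2, "number": 3, "int": 4, "integer": 5, "long": 6}
--     best = None  # (rank, name) of the best-ranked column seen so far
--     for col in columns:
--         r = rank.get(str(col.get("inferred_type", "")).lower())
--         if r is not None and (best is None or r < best[0]):
--             best = (r, str(col.get("name")))
--     if best is not None:
--         return best[1]
--     return str(columns[0].get("name")) if columns else "value"
-- ===== Notes on version B (the rewrite author's own statement) =====
-- stated objective: alternative
-- what changed: Replaces the seven sequential scans of columns (one per type in priority order) with a single pass that tracks the lowest-ranked column via a type-to-rank dict and a strict < comparison.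
import Mathlib
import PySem

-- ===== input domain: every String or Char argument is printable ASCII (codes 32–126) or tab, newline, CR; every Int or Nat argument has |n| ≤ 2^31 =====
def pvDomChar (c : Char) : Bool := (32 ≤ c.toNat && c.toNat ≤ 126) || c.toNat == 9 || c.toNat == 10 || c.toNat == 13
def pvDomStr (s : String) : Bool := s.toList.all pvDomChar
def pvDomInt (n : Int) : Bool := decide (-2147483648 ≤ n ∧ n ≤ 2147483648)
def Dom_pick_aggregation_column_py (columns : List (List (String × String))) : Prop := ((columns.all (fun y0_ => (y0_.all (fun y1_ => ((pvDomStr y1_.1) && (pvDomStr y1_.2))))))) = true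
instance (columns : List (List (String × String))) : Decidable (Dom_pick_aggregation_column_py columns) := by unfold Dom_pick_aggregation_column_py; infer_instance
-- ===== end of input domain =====

-- B makes a single pass over columns tracking the lowest-ranked type (rank dict, strict <),
-- instead of A's seven sequential scans; same return value, objective: alternative decomposition.

-- ===== PORT A =====
-- str(col.get("inferred_type", "")).lower()  (values are strings, str() is the identity)
def pvLowerIT (col : List (String × String)) : String :=
  PySem.Str.lower ((List.lookup "inferred_type" col).getD "")

-- str(col.get("name"))  (missing key gives None, str(None) = "None")
def pvName (col : List (String × String)) : String :=
  (List.lookup "name" col).getD "None"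

-- inner loop: 'for col in columns: if … == t: return str(col.get("name"))'
def pvFindType (t : String) : List (List (String × String)) → Option String
  | [] => none
  | c :: cs => if pvLowerIT c = t then some (pvName c) else pvFindType t cs

-- outer loop over a tuple of type names, early return on first hit
def pvScanTypes : List String → List (List (String × String)) → Option String
  | [], _ => none
  | t :: ts, cols =>
    match pvFindType t cols with
    | some n => some n
    | none => pvScanTypes ts cols

def pick_aggregation_column_py (columns : List (List (String × String))) : String :=
  match pvScanTypes ["double", "float"] columns with
  | some n => n
  | none =>
    match pvScanTypes ["decimal", "number", "int", "integer", "long"] columns with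
    | some n => n
    | none => match columns with
      | [] => "value"
      | c :: _ => pvName c

-- ===== PORT B =====
-- rank = {"double": 0, …, "long": 6}
def pvRankTable : List (String × Nat) :=
  [("double", 0), ("float", 1), ("decimal", 2), ("number", 3), ("int", 4), ("integer", 5), ("long", 6)]

-- rank.get(str(col.get("inferred_type", "")).lower())
def pvRank? (col : List (String × String)) : Option Nat :=
  List.lookup (pvLowerIT col) pvRankTable

-- loop body: keep best if r is None or not strictly smaller
def pvStep (best : Option (Nat × String)) (col : List (String × String)) : Option (Nat × String) :=
  match pvRank? col with
  | none => best
  | some r =>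
    match best with
    | none => some (r, pvName col)
    | some (br, bn) => if r < br then some (r, pvName col) else some (br, bn)

def pick_aggregation_column_py_alt (columns : List (List (String × String))) : String :=
  match columns.foldl pvStep none with
  | some (_, n) => n
  | none => match columns with
    | [] => "value"
    | c :: _ => pvName c

-- ===== PRECONDITION & SPEC =====
def Spec_pick_aggregation_column_py (columns : List (List (String × String))) (out : String) : Prop := out = pick_aggregation_column_py_alt columns
instance (columns : List (List (String × String))) (out : String) : Decidable (Spec_pick_aggregation_column_py columns out) := by unfold Spec_pick_aggregation_column_py; infer_instance

-- ===== CLAIM (what is proved, stated in full; the proofs are below) =====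
def Claim_equal_pick_aggregation_column_py : Prop := ∀ (columns : List (List (String × String))), Dom_pick_aggregation_column_py columns → Spec_pick_aggregation_column_py columns (pick_aggregation_column_py columns)

-- ===== LEMMAS AND PROOFS =====

-- rank of a column relative to an arbitrary priority list of type names
def pvRkIn (ts : List String) (col : List (String × String)) : Option Nat :=
  ts.idxOf? (pvLowerIT col)

-- merge two candidate (rank, name) options: the left (earlier) one wins ties
def pvMerge : Option (Nat × String) → Option (Nat × String) → Option (Nat × String)
  | none, b => b
  | some a, none => some a
  | some (r, n), some (r', n') => if r' < r then some (r', n') else some (r, n)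

-- best (lowest-ranked, earliest) column of cols w.r.t. priority list ts
def pvBestIn (ts : List String) : List (List (String × String)) → Option (Nat × String)
  | [] => none
  | c :: cs => pvMerge ((pvRkIn ts c).map (fun r => (r, pvName c))) (pvBestIn ts cs)

def pvP : List String := ["double", "float", "decimal", "number", "int", "integer", "long"]

lemma pvRank?_eq (c : List (String × String)) : pvRank? c = pvRkIn pvP c := by
  rw [pvRank?, pvRkIn]
  generalize pvLowerIT c = s
  by_cases h1 : s = "double"; · subst h1; rfl
  by_cases h2 : s = "float"; · subst h2; rfl
  by_cases h3 : s = "decimal"; · subst h3; rfl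
  by_cases h4 : s = "number"; · subst h4; rfl
  by_cases h5 : s = "int"; · subst h5; rfl
  by_cases h6 : s = "integer"; · subst h6; rfl
  by_cases h7 : s = "long"; · subst h7; rfl
  simp [pvRankTable, pvP, List.lookup_cons, List.idxOf?_cons, List.lookup_nil, List.idxOf?_nil,
    beq_eq_false_iff_ne.mpr h1, beq_eq_false_iff_ne.mpr h2, beq_eq_false_iff_ne.mpr h3,
    beq_eq_false_iff_ne.mpr h4, beq_eq_false_iff_ne.mpr h5, beq_eq_false_iff_ne.mpr h6,
    beq_eq_false_iff_ne.mpr h7, Ne.symm h1, Ne.symm h2, Ne.symm h3, Ne.symm h4, Ne.symm h5,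
    Ne.symm h6, Ne.symm h7]

lemma pvStep_eq (acc : Option (Nat × String)) (c : List (String × String)) :
    pvStep acc c = pvMerge acc ((pvRkIn pvP c).map (fun r => (r, pvName c))) := by
  rw [pvStep, pvRank?_eq]
  cases pvRkIn pvP c with
  | none => cases acc <;> rfl
  | some r =>
    cases acc with
    | none => rfl
    | some a => obtain ⟨br, bn⟩ := a; rfl

lemma pvMerge_assoc (a b c : Option (Nat × String)) :
    pvMerge (pvMerge a b) c = pvMerge a (pvMerge b c) := by
  rcases a with _ | ⟨ar, an⟩ <;> rcases b with _ | ⟨br, bn⟩ <;> rcases c with _ | ⟨cr, cn⟩ <;>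
    simp only [pvMerge] <;> split_ifs <;>
    first
      | rfl
      | omega
      | (show (if _ then _ else _ : Option (Nat × String)) = if _ then _ else _
         split_ifs <;> first | rfl | omega)

lemma pvFoldl_eq (cols : List (List (String × String))) (acc : Option (Nat × String)) :
    cols.foldl pvStep acc = pvMerge acc (pvBestIn pvP cols) := by
  induction cols generalizing acc with
  | nil => cases acc <;> rfl
  | cons c cs ih =>
    simp only [List.foldl_cons, ih, pvStep_eq, pvBestIn, pvMerge_assoc]

-- nothing matches the empty type list: best is none
lemma pvBestIn_nil_ts (cols : List (List (String × String))) : pvBestIn [] cols = none := by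
  induction cols with
  | nil => rfl
  | cons c cs ih => simp [pvBestIn, pvRkIn, ih, pvMerge]

-- a hit for the head type: best has rank 0 with the first matching name
lemma pvBestIn_cons_hit (t : String) (ts : List String) (cols : List (List (String × String)))
    (n : String) (h : pvFindType t cols = some n) :
    pvBestIn (t :: ts) cols = some (0, n) := by
  induction cols with
  | nil => simp [pvFindType] at h
  | cons c cs ih =>
    rw [pvFindType] at h
    by_cases hc : pvLowerIT c = t
    · rw [if_pos hc, Option.some.injEq] at h
      subst h
      have hr : pvRkIn (t :: ts) c = some 0 := by
        simp [pvRkIn, hc, List.idxOf?_cons]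
      rw [pvBestIn, hr]
      cases pvBestIn (t :: ts) cs with
      | none => rfl
      | some b => obtain ⟨br, bn⟩ := b; simp [pvMerge]
    · rw [if_neg hc] at h
      rw [pvBestIn, ih h]
      cases hr : pvRkIn (t :: ts) c with
      | none => rfl
      | some r =>
        have hr0 : r ≠ 0 := by
          simp only [pvRkIn, List.idxOf?_cons, beq_eq_false_iff_ne.mpr (Ne.symm hc)] at hr
          rcases Option.map_eq_some_iff.mp hr with ⟨k, _, hk⟩
          omega
        simp [pvMerge, Nat.pos_of_ne_zero hr0]

-- no hit for the head type: ranks shift by one, the chosen column is unchanged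
lemma pvBestIn_cons_miss (t : String) (ts : List String) (cols : List (List (String × String)))
    (h : pvFindType t cols = none) :
    pvBestIn (t :: ts) cols = (pvBestIn ts cols).map (fun p => (p.1 + 1, p.2)) := by
  induction cols with
  | nil => rfl
  | cons c cs ih =>
    rw [pvFindType] at h
    by_cases hc : pvLowerIT c = t
    · simp [hc] at h
    · rw [if_neg hc] at h
      have hr : pvRkIn (t :: ts) c = (pvRkIn ts c).map (· + 1) := by
        simp [pvRkIn, List.idxOf?_cons, beq_eq_false_iff_ne.mpr (Ne.symm hc)]
      rw [pvBestIn, pvBestIn, ih h, hr]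
      cases pvRkIn ts c with
      | none => rfl
      | some r =>
        cases pvBestIn ts cs with
        | none => rfl
        | some b =>
          obtain ⟨br, bn⟩ := b
          simp only [Option.map_some, pvMerge]
          split_ifs <;> first | rfl | omega

lemma pvScan_eq (ts : List String) (cols : List (List (String × String))) :
    pvScanTypes ts cols = (pvBestIn ts cols).map Prod.snd := by
  induction ts generalizing cols with
  | nil => simp [pvScanTypes, pvBestIn_nil_ts]
  | cons t ts ih =>
    rw [pvScanTypes]
    cases h : pvFindType t cols with
    | some n => rw [pvBestIn_cons_hit t ts cols n h]; rfl
    | none => rw [ih, pvBestIn_cons_miss t ts cols h]; cases pvBestIn ts cols <;> rfl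

lemma pvScan_append (ts1 ts2 : List String) (cols : List (List (String × String))) :
    pvScanTypes (ts1 ++ ts2) cols =
      match pvScanTypes ts1 cols with
      | some n => some n
      | none => pvScanTypes ts2 cols := by
  induction ts1 with
  | nil => rfl
  | cons t ts ih =>
    simp only [List.cons_append, pvScanTypes, ih]
    cases pvFindType t cols <;> rfl

-- ===== VERDICT (by name: the statement is the Claim_ definition above) =====
theorem pick_aggregation_column_py_spec : Claim_equal_pick_aggregation_column_py := by
  intro cols _
  unfold Spec_pick_aggregation_column_py pick_aggregation_column_py pick_aggregation_column_py_alt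
  rw [pvFoldl_eq]
  have h : (pvBestIn pvP cols).map Prod.snd =
      match pvScanTypes ["double", "float"] cols with
      | some n => some n
      | none => pvScanTypes ["decimal", "number", "int", "integer", "long"] cols := by
    rw [← pvScan_eq]
    exact pvScan_append ["double", "float"] ["decimal", "number", "int", "integer", "long"] cols
  cases h1 : pvScanTypes ["double", "float"] cols with
  | some n =>
    rw [h1] at h
    cases hb : pvBestIn pvP cols with
    | none => rw [hb] at h; simp at h
    | some b =>
      obtain ⟨r, m⟩ := b
      rw [hb] at h
      simp only [Option.map_some] at h
      rw [Option.some.injEq] at h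
      simp only [pvMerge]
      rw [h]
  | none =>
    rw [h1] at h
    cases h2 : pvScanTypes ["decimal", "number", "int", "integer", "long"] cols with
    | some n =>
      rw [h2] at h
      cases hb : pvBestIn pvP cols with
      | none => rw [hb] at h; simp at h
      | some b =>
        obtain ⟨r, m⟩ := b
        rw [hb] at h
        simp only [Option.map_some, Option.some.injEq] at h
        simp only [pvMerge]
        rw [h]
    | none =>
      rw [h2] at h
      cases hb : pvBestIn pvP cols with
      | none => rfl
      | some b => rw [hb] at h; simp at h
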